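-- pv_equiv track=rewrite | github.com/wallee3535/AdventOfCode2019 | day6.py | getTotalOrbitsHelper
-- ===== SOURCE A (Python) =====
-- def getTotalOrbitsHelper(orbiter, orbiterToOrbitees, orbiterToNumOrbits):
--     if orbiter in orbiterToNumOrbits:
--         return orbiterToNumOrbits[orbiter]
--     #direct orbits
--     total = len(orbiterToOrbitees[orbiter])
--     #indirect orbits
--     for childOrbiter in orbiterToOrbitees[orbiter]:
--         total += getTotalOrbitsHelper(childOrbiter, orbiterToOrbitees, orbiterToNumOrbits)
--
--     orbiterToNumOrbits[orbiter] = total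
--     return total
-- ===== SOURCE B (Python) =====
-- def getTotalOrbitsHelper(orbiter, orbiterToOrbitees, orbiterToNumOrbits):
--     # Iterative explicit-stack post-order traversal instead of recursion.
--     # Uses (and fills) the same memo dict orbiterToNumOrbits.
--     cache = orbiterToNumOrbits
--     stack = [orbiter]
--     while stack:
--         n = stack.pop()
--         if n in cache:
--             continue
--         children = orbiterToOrbitees[n]
--         uncached = [c for c in children if c not in cache]
--         if not uncached:
--             cache[n] = len(children) + sum(cache[c] for c in children)
--         else:
--             stack.append(n)
--             stack.extend(reversed(uncached))
--     return cache[orbiter]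
-- ===== Notes on version B (the rewrite author's own statement) =====
-- stated objective: alternative
-- what changed: Replaces the memoized recursion with an iterative explicit-stack post-order traversal: a node is expanded by pushing itself back under its uncached children and is cached once all children are cached; same memo dict, same cached values, same return value.
import Mathlib
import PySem

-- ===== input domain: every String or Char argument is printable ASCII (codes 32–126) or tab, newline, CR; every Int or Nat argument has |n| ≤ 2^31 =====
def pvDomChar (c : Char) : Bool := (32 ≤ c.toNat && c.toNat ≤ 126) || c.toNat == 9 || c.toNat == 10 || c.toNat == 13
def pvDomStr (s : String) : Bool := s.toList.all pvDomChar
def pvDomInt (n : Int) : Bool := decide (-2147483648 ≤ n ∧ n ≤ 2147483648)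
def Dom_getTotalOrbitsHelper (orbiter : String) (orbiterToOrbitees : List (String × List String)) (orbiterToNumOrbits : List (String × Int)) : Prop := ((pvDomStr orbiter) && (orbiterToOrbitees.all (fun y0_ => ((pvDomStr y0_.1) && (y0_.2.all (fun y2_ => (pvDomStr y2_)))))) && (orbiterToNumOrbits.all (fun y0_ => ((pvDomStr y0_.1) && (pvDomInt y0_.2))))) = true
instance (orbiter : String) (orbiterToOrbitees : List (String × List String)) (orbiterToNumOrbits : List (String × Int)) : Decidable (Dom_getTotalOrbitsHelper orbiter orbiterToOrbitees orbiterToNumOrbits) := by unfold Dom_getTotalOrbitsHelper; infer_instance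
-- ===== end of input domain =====

-- B replaces A's memoized recursion by an iterative explicit-stack post-order traversal over the
-- same memo dict (objective: alternative, same cost). Both A and B mutate orbiterToNumOrbits the
-- same way; the equivalence proved here is about the return value.
-- Fuel arguments in both ports are only a totality device; Pre_ guarantees they suffice.

-- ===== PORT A =====
-- max child-list length (used only to size the fuel of the ports)
def pvL (g : List (String × List String)) : Nat := g.foldl (fun a p => max a p.2.length) 0
-- fuel for port A
def pvFA (g : List (String × List String)) : Nat := (pvL g + 1) * (g.length + 2) + 1

mutual
-- the recursion of A: returns (value, updated memo); none = KeyError / fuel exhausted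
def pvGoA (fuel : Nat) (n : String) (g : PySem.Dict String (List String)) (d : PySem.Dict String Int) : Option (Int × PySem.Dict String Int) :=
  match fuel with
  | 0 => none
  | f + 1 =>
    match PySem.Dict.get? d n with
    | some v => some (v, d)                      -- if orbiter in orbiterToNumOrbits: return it
    | none =>
      match PySem.Dict.get? g n with
      | none => none                             -- KeyError
      | some cs =>
        match pvGoAs f cs g d with               -- for childOrbiter in …: total += rec(child)
        | none => none
        | some (s, d') =>
          some ((cs.length : Int) + s, d'.insert n ((cs.length : Int) + s))
termination_by fuel
-- the child loop of A, threading the memo dict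
def pvGoAs (fuel : Nat) (cs : List String) (g : PySem.Dict String (List String)) (d : PySem.Dict String Int) : Option (Int × PySem.Dict String Int) :=
  match cs with
  | [] => some (0, d)
  | c :: rest =>
    match fuel with
    | 0 => none
    | f + 1 =>
      match pvGoA f c g d with
      | none => none
      | some (v, d') =>
        match pvGoAs f rest g d' with
        | none => none
        | some (s, d'') => some (v + s, d'')
termination_by fuel
end

def getTotalOrbitsHelper (orbiter : String) (orbiterToOrbitees : List (String × List String)) (orbiterToNumOrbits : List (String × Int)) : Int :=
  match pvGoA (pvFA orbiterToOrbitees) orbiter (PySem.Dict.mk orbiterToOrbitees) (PySem.Dict.mk orbiterToNumOrbits) with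
  | some (v, _) => v
  | none => 0

-- ===== PORT B =====
-- fuel for port B: enough iterations of the stack loop for any input satisfying Pre_
def pvS (g : List (String × List String)) (i : Nat) : Nat := (pvL g + 2) ^ (i + 1)
def pvFB (g : List (String × List String)) : Nat := pvS g (g.length + 1) + 1

-- the while loop of B; list head = top of stack; none = KeyError / fuel exhausted
def pvGoB (fuel : Nat) (stack : List String) (g : PySem.Dict String (List String)) (cache : PySem.Dict String Int) : Option (PySem.Dict String Int) :=
  match fuel with
  | 0 => none
  | f + 1 =>
    match stack with
    | [] => some cache
    | n :: rest =>
      if (PySem.Dict.get? cache n).isSome then pvGoB f rest g cache   -- if n in cache: continue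
      else
        match PySem.Dict.get? g n with
        | none => none                                                -- KeyError
        | some cs =>
          let uncached := cs.filter (fun c => !(PySem.Dict.get? cache c).isSome)
          if uncached.isEmpty then
            pvGoB f rest g (cache.insert n ((cs.length : Int) + (cs.map (fun c => (PySem.Dict.get? cache c).getD 0)).sum))
          else
            pvGoB f (uncached ++ n :: rest) g cache                   -- push n back under its uncached children

def getTotalOrbitsHelper_alt (orbiter : String) (orbiterToOrbitees : List (String × List String)) (orbiterToNumOrbits : List (String × Int)) : Int :=
  match pvGoB (pvFB orbiterToOrbitees) [orbiter] (PySem.Dict.mk orbiterToOrbitees) (PySem.Dict.mk orbiterToNumOrbits) with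
  | some cache => (PySem.Dict.get? cache orbiter).getD 0
  | none => 0

-- ===== PRECONDITION & SPEC =====
-- pvOk g memo i: the i-th layer of the well-founded part of the orbit graph: memo keys, then
-- repeatedly every key of g all of whose children already lie in the previous layer.
def pvOk (g : List (String × List String)) (memo : List (String × Int)) : Nat → List String
  | 0 => memo.map Prod.fst
  | i + 1 =>
    let S := pvOk g memo i
    S ++ (g.map Prod.fst).filter (fun k => !(S.contains k) && (((PySem.Dict.get? (PySem.Dict.mk g) k).getD []).all (fun c => S.contains c)))

-- Pre_ holds exactly when A returns normally: the start node lies in the well-founded part of the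
-- graph (the fixpoint is reached after g.length+1 layers), i.e. no KeyError and no infinite recursion.
def Pre_getTotalOrbitsHelper (orbiter : String) (orbiterToOrbitees : List (String × List String)) (orbiterToNumOrbits : List (String × Int)) : Prop :=
  orbiter ∈ pvOk orbiterToOrbitees orbiterToNumOrbits (orbiterToOrbitees.length + 1)
instance (orbiter : String) (orbiterToOrbitees : List (String × List String)) (orbiterToNumOrbits : List (String × Int)) : Decidable (Pre_getTotalOrbitsHelper orbiter orbiterToOrbitees orbiterToNumOrbits) := by unfold Pre_getTotalOrbitsHelper; infer_instance

def pvWitness_getTotalOrbitsHelper : String × (List (String × List String)) × (List (String × Int)) :=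
  ("A", [("A", ["B", "C"]), ("B", []), ("C", [])], [])

def Spec_getTotalOrbitsHelper (orbiter : String) (orbiterToOrbitees : List (String × List String)) (orbiterToNumOrbits : List (String × Int)) (out : Int) : Prop := out = getTotalOrbitsHelper_alt orbiter orbiterToOrbitees orbiterToNumOrbits
instance (orbiter : String) (orbiterToOrbitees : List (String × List String)) (orbiterToNumOrbits : List (String × Int)) (out : Int) : Decidable (Spec_getTotalOrbitsHelper orbiter orbiterToOrbitees orbiterToNumOrbits out) := by unfold Spec_getTotalOrbitsHelper; infer_instance

-- ===== CLAIM (what is proved, stated in full; the proofs are below) =====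
def Claim_equal_getTotalOrbitsHelper : Prop := ∀ (orbiter : String) (orbiterToOrbitees : List (String × List String)) (orbiterToNumOrbits : List (String × Int)), Dom_getTotalOrbitsHelper orbiter orbiterToOrbitees orbiterToNumOrbits → Pre_getTotalOrbitsHelper orbiter orbiterToOrbitees orbiterToNumOrbits → Spec_getTotalOrbitsHelper orbiter orbiterToOrbitees orbiterToNumOrbits (getTotalOrbitsHelper orbiter orbiterToOrbitees orbiterToNumOrbits)

-- ===== LEMMAS AND PROOFS =====

-- the common value: what A computes for node n from the ORIGINAL memo
def pvVal (g : List (String × List String)) (memo : List (String × Int)) (n : String) : Int :=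
  getTotalOrbitsHelper n g memo

-- dict extension (only new keys were added)
def pvSub (d d' : PySem.Dict String Int) : Prop :=
  ∀ k v, PySem.Dict.get? d k = some v → PySem.Dict.get? d' k = some v

-- invariant: every entry of the running memo is the value A computes for that key from scratch
def pvInv (g : List (String × List String)) (memo : List (String × Int)) (d : PySem.Dict String Int) : Prop :=
  ∀ k v, PySem.Dict.get? d k = some v →
    (pvGoA (pvFA g) k (PySem.Dict.mk g) (PySem.Dict.mk memo)).map Prod.fst = some v

theorem pvSub_trans {a b c : PySem.Dict String Int} (h1 : pvSub a b) (h2 : pvSub b c) : pvSub a c :=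
  fun k v h => h2 k v (h1 k v h)

theorem pvValOf {g : List (String × List String)} {memo : List (String × Int)} {n : String} {v : Int}
    (h : (pvGoA (pvFA g) n (PySem.Dict.mk g) (PySem.Dict.mk memo)).map Prod.fst = some v) :
    pvVal g memo n = v := by
  unfold pvVal getTotalOrbitsHelper
  cases hg : pvGoA (pvFA g) n (PySem.Dict.mk g) (PySem.Dict.mk memo) with
  | none => rw [hg] at h; exact absurd h (by simp)
  | some p =>
    obtain ⟨p1, p2⟩ := p
    rw [hg] at h
    simp only [Option.map_some] at h
    exact Option.some.inj h

theorem pvInv_mk (g : List (String × List String)) (memo : List (String × Int)) :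
    pvInv g memo (PySem.Dict.mk memo) := by
  intro k v h
  rw [show pvFA g = (pvL g + 1) * (g.length + 2) + 1 from rfl]
  simp only [pvGoA, h, Option.map_some]

theorem pvKeyGet {ν : Type} (g : List (String × ν)) (n : String) (h : n ∈ g.map Prod.fst) :
    ∃ v, PySem.Dict.get? (PySem.Dict.mk g) n = some v := by
  induction g with
  | nil => simp at h
  | cons p t ih =>
    obtain ⟨k0, v0⟩ := p
    by_cases hp : k0 = n
    · exact ⟨v0, by simp [PySem.Dict.get?_mk_cons, hp]⟩
    · have hm : n ∈ t.map Prod.fst := by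
        simp only [List.map_cons, List.mem_cons] at h
        rcases h with h | h
        · exact absurd h.symm hp
        · exact h
      obtain ⟨v, hv⟩ := ih hm
      exact ⟨v, by simp [PySem.Dict.get?_mk_cons, hp, hv]⟩

theorem pvL_ge (g : List (String × List String)) (p : String × List String) (hp : p ∈ g) :
    p.2.length ≤ pvL g := by
  unfold pvL
  have aux : ∀ (l : List (String × List String)) (a : Nat),
      (a ≤ l.foldl (fun a p => max a p.2.length) a) ∧
      (∀ q ∈ l, q.2.length ≤ l.foldl (fun a p => max a p.2.length) a) := by
    intro l
    induction l with
    | nil => intro a; exact ⟨le_rfl, by simp⟩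
    | cons x t ih =>
      intro a
      constructor
      · exact le_trans (le_max_left a x.2.length) ((ih (max a x.2.length)).1)
      · intro q hq
        rw [List.mem_cons] at hq
        rcases hq with hq | hq
        · subst hq
          exact le_trans (le_max_right a q.2.length) ((ih (max a q.2.length)).1)
        · exact (ih (max a x.2.length)).2 q hq
  exact (aux g 0).2 p hp

theorem pvCsLen {g : List (String × List String)} {n : String} {cs : List String}
    (h : PySem.Dict.get? (PySem.Dict.mk g) n = some cs) : cs.length ≤ pvL g := by
  have hm : (n, cs) ∈ (PySem.Dict.mk g).items := PySem.Dict.mem_items_of_get?_eq_some _ h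
  exact pvL_ge g (n, cs) hm

theorem pvOk_succ_elim {g : List (String × List String)} {memo : List (String × Int)} {i : Nat} {n : String}
    (h : n ∈ pvOk g memo (i + 1)) :
    n ∈ pvOk g memo i ∨ (n ∉ pvOk g memo i ∧
      ∃ cs, PySem.Dict.get? (PySem.Dict.mk g) n = some cs ∧ ∀ c ∈ cs, c ∈ pvOk g memo i) := by
  unfold pvOk at h
  rcases List.mem_append.mp h with h | h
  · exact Or.inl h
  · right
    rw [List.mem_filter] at h
    obtain ⟨hkey, hpred⟩ := h
    simp only [Bool.and_eq_true, Bool.not_eq_true', List.contains_eq_mem, decide_eq_false_iff_not,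
      List.all_eq_true, decide_eq_true_eq] at hpred
    obtain ⟨cs, hcs⟩ := pvKeyGet g n hkey
    refine ⟨hpred.1, cs, hcs, ?_⟩
    intro c hc
    have := hpred.2 c
    rw [hcs] at this
    exact this hc

theorem pvOk_zero_get {g : List (String × List String)} {memo : List (String × Int)} {n : String}
    (h : n ∈ pvOk g memo 0) : ∃ v, PySem.Dict.get? (PySem.Dict.mk memo) n = some v :=
  pvKeyGet memo n h

-- the child loop of A computes the sum of pvVal over the children, given the node lemma at rank i
theorem pvLas (g : List (String × List String)) (memo : List (String × Int)) (i : Nat)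
    (IH : ∀ n d f, n ∈ pvOk g memo i → pvInv g memo d → pvSub (PySem.Dict.mk memo) d →
      (pvL g + 1) * i + 1 ≤ f →
      ∃ d', pvGoA f n (PySem.Dict.mk g) d = some (pvVal g memo n, d') ∧ pvInv g memo d' ∧ pvSub d d') :
    ∀ (cs : List String) (d : PySem.Dict String Int) (f : Nat),
      (∀ c ∈ cs, c ∈ pvOk g memo i) → pvInv g memo d → pvSub (PySem.Dict.mk memo) d →
      (pvL g + 1) * i + 1 + cs.length ≤ f →
      ∃ d', pvGoAs f cs (PySem.Dict.mk g) d = some ((cs.map (pvVal g memo)).sum, d') ∧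
        pvInv g memo d' ∧ pvSub d d' := by
  intro cs
  induction cs with
  | nil =>
    intro d f _ hInv hSub _
    exact ⟨d, by simp [pvGoAs], hInv, fun _ _ h => h⟩
  | cons c rest ih =>
    intro d f hcs hInv hSub hf
    obtain ⟨f', rfl⟩ : ∃ f', f = f' + 1 := by
      cases f with
      | zero => omega
      | succ m => exact ⟨m, rfl⟩
    obtain ⟨d1, hA, hInv1, hSub1⟩ := IH c d f' (hcs c (by simp)) hInv hSub (by simp at hf; omega)
    obtain ⟨d2, hAs, hInv2, hSub2⟩ := ih d1 f' (fun x hx => hcs x (by simp [hx])) hInv1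
      (pvSub_trans hSub hSub1) (by simp at hf ⊢; omega)
    refine ⟨d2, ?_, hInv2, pvSub_trans hSub1 hSub2⟩
    simp only [pvGoAs, hA, hAs, List.map_cons, List.sum_cons]

-- main A-side lemma: on a rank-i node, A's recursion succeeds, returns pvVal, preserves the invariant
theorem pvLa (g : List (String × List String)) (memo : List (String × Int)) :
    ∀ i, i ≤ g.length + 1 →
    ∀ n d f, n ∈ pvOk g memo i → pvInv g memo d → pvSub (PySem.Dict.mk memo) d →
      (pvL g + 1) * i + 1 ≤ f →
      ∃ d', pvGoA f n (PySem.Dict.mk g) d = some (pvVal g memo n, d') ∧ pvInv g memo d' ∧ pvSub d d' := by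
  intro i
  induction i with
  | zero =>
    intro _ n d f hn hInv hSub hf
    obtain ⟨v, hv⟩ := pvOk_zero_get hn
    have hd : PySem.Dict.get? d n = some v := hSub n v hv
    obtain ⟨f', rfl⟩ : ∃ f', f = f' + 1 := by
      cases f with
      | zero => omega
      | succ m => exact ⟨m, rfl⟩
    have hval : pvVal g memo n = v := pvValOf (by
      rw [show pvFA g = (pvL g + 1) * (g.length + 2) + 1 from rfl]
      simp only [pvGoA, hv, Option.map_some])
    exact ⟨d, by simp only [pvGoA, hd, hval], hInv, fun _ _ h => h⟩
  | succ i ih =>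
    intro hle n d f hn hInv hSub hf
    have hmul : (pvL g + 1) * (i + 1) = (pvL g + 1) * i + (pvL g + 1) := by ring
    rcases pvOk_succ_elim hn with hn' | ⟨_, cs, hcs, hch⟩
    · exact ih (by omega) n d f hn' hInv hSub (by omega)
    · obtain ⟨f', rfl⟩ : ∃ f', f = f' + 1 := by
        cases f with
        | zero => omega
        | succ m => exact ⟨m, rfl⟩
      have hcsL : cs.length ≤ pvL g := pvCsLen hcs
      cases hd : PySem.Dict.get? d n with
      | some v =>
        have hval : pvVal g memo n = v := pvValOf (hInv n v hd)
        exact ⟨d, by simp only [pvGoA, hd, hval], hInv, fun _ _ h => h⟩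
      | none =>
        -- children loop from the threaded memo
        obtain ⟨d1, hAs, hInv1, hSub1⟩ := pvLas g memo i (ih (by omega)) cs d f' hch hInv hSub (by omega)
        -- the same node computed from the original memo: establishes pvVal n
        have hm0 : PySem.Dict.get? (PySem.Dict.mk memo) n = none := by
          cases hm : PySem.Dict.get? (PySem.Dict.mk memo) n with
          | none => rfl
          | some w => rw [hSub n w hm] at hd; cases hd
        obtain ⟨dm, hAsm, _, _⟩ := pvLas g memo i (ih (by omega)) cs (PySem.Dict.mk memo)
          ((pvL g + 1) * (g.length + 2)) hch (pvInv_mk g memo) (fun _ _ h => h)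
          (by have : (pvL g + 1) * (i + 1) ≤ (pvL g + 1) * (g.length + 2) :=
                Nat.mul_le_mul le_rfl (by omega)
              omega)
        have hgoal : pvGoA (pvFA g) n (PySem.Dict.mk g) (PySem.Dict.mk memo) =
            some ((cs.length : Int) + (cs.map (pvVal g memo)).sum,
              dm.insert n ((cs.length : Int) + (cs.map (pvVal g memo)).sum)) := by
          rw [show pvFA g = (pvL g + 1) * (g.length + 2) + 1 from rfl]
          simp only [pvGoA, hm0, hcs, hAsm]
        have hval : pvVal g memo n = (cs.length : Int) + (cs.map (pvVal g memo)).sum :=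
          pvValOf (by rw [hgoal]; rfl)
        refine ⟨d1.insert n (pvVal g memo n), ?_, ?_, ?_⟩
        · simp only [pvGoA, hd, hcs, hAs, hval]
        · intro k v hk
          rw [PySem.Dict.get?_insert] at hk
          by_cases hkn : k = n
          · rw [if_pos hkn] at hk
            subst hkn
            rw [hgoal]
            simp only [Option.map_some]
            rw [← (Option.some.inj hk), hval]
          · rw [if_neg hkn] at hk
            exact hInv1 k v hk
        · intro k v hk
          have hkn : k ≠ n := by
            intro h; subst h; rw [hk] at hd; cases hd
          rw [PySem.Dict.get?_insert, if_neg hkn]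
          exact hSub1 k v hk

-- consequence: the defining equation of pvVal on a non-memoized node
theorem pvVal_eq (g : List (String × List String)) (memo : List (String × Int)) {i : Nat} {n : String}
    {cs : List String} (hi : i ≤ g.length + 1)
    (hm0 : PySem.Dict.get? (PySem.Dict.mk memo) n = none)
    (hcs : PySem.Dict.get? (PySem.Dict.mk g) n = some cs)
    (hch : ∀ c ∈ cs, c ∈ pvOk g memo i) :
    pvVal g memo n = (cs.length : Int) + (cs.map (pvVal g memo)).sum := by
  have hcsL : cs.length ≤ pvL g := pvCsLen hcs
  obtain ⟨dm, hAsm, _, _⟩ := pvLas g memo i (pvLa g memo i hi) cs (PySem.Dict.mk memo)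
    ((pvL g + 1) * (g.length + 2)) hch (pvInv_mk g memo) (fun _ _ h => h)
    (by have : (pvL g + 1) * (i + 1) ≤ (pvL g + 1) * (g.length + 2) :=
          Nat.mul_le_mul le_rfl (by omega)
        have hmul : (pvL g + 1) * (i + 1) = (pvL g + 1) * i + (pvL g + 1) := by ring
        omega)
  exact pvValOf (by
    rw [show pvFA g = (pvL g + 1) * (g.length + 2) + 1 from rfl]
    simp only [pvGoA, hm0, hcs, hAsm, Option.map_some])

theorem pvGoB_nil {g : PySem.Dict String (List String)} {c : PySem.Dict String Int} {f : Nat}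
    (hf : 1 ≤ f) : pvGoB f [] g c = some c := by
  obtain ⟨f', rfl⟩ : ∃ f', f = f' + 1 := by
    cases f with
    | zero => omega
    | succ m => exact ⟨m, rfl⟩
  simp [pvGoB]

-- processing a list of rank-i nodes on top of the stack, given the node lemma at rank i
theorem pvLbs (g : List (String × List String)) (memo : List (String × Int)) (i : Nat)
    (IH : ∀ n cache, n ∈ pvOk g memo i → pvInv g memo cache → pvSub (PySem.Dict.mk memo) cache →
      ∃ k cache', 1 ≤ k ∧ k ≤ pvS g i ∧ pvSub cache cache' ∧ pvInv g memo cache' ∧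
        (PySem.Dict.get? cache' n).isSome ∧
        ∀ rest f, pvGoB (f + k) (n :: rest) (PySem.Dict.mk g) cache = pvGoB f rest (PySem.Dict.mk g) cache') :
    ∀ (ds : List String) (cache : PySem.Dict String Int),
      (∀ c ∈ ds, c ∈ pvOk g memo i) → pvInv g memo cache → pvSub (PySem.Dict.mk memo) cache →
      ∃ k cache', k ≤ ds.length * pvS g i ∧ pvSub cache cache' ∧ pvInv g memo cache' ∧
        (∀ c ∈ ds, (PySem.Dict.get? cache' c).isSome) ∧
        ∀ rest f, pvGoB (f + k) (ds ++ rest) (PySem.Dict.mk g) cache = pvGoB f rest (PySem.Dict.mk g) cache' := by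
  intro ds
  induction ds with
  | nil =>
    intro cache _ hInv hSub
    exact ⟨0, cache, by simp, fun _ _ h => h, hInv, by simp, fun rest f => rfl⟩
  | cons c rest ih =>
    intro cache hds hInv hSub
    obtain ⟨k1, c1, hk1, hk1S, hSub1, hInv1, hSome1, heq1⟩ := IH c cache (hds c (by simp)) hInv hSub
    obtain ⟨k2, c2, hk2, hSub2, hInv2, hSome2, heq2⟩ := ih c1 (fun x hx => hds x (by simp [hx]))
      hInv1 (pvSub_trans hSub hSub1)
    refine ⟨k1 + k2, c2, by simp [Nat.succ_mul]; omega, pvSub_trans hSub1 hSub2, hInv2, ?_, ?_⟩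
    · intro x hx
      rw [List.mem_cons] at hx
      rcases hx with hx | hx
      · obtain ⟨v, hv⟩ := Option.isSome_iff_exists.mp hSome1
        rw [hx, hSub2 c v hv]; rfl
      · exact hSome2 x hx
    · intro rst f
      have : f + (k1 + k2) = (f + k2) + k1 := by omega
      rw [this]
      calc pvGoB ((f + k2) + k1) (c :: (rest ++ rst)) (PySem.Dict.mk g) cache
          = pvGoB (f + k2) (rest ++ rst) (PySem.Dict.mk g) c1 := heq1 (rest ++ rst) (f + k2)
        _ = pvGoB f rst (PySem.Dict.mk g) c2 := heq2 rst f

-- main B-side lemma: popping a rank-i node consumes ≤ pvS g i steps and caches it with pvVal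
theorem pvLb (g : List (String × List String)) (memo : List (String × Int)) :
    ∀ i, i ≤ g.length + 1 →
    ∀ n cache, n ∈ pvOk g memo i → pvInv g memo cache → pvSub (PySem.Dict.mk memo) cache →
      ∃ k cache', 1 ≤ k ∧ k ≤ pvS g i ∧ pvSub cache cache' ∧ pvInv g memo cache' ∧
        (PySem.Dict.get? cache' n).isSome ∧
        ∀ rest f, pvGoB (f + k) (n :: rest) (PySem.Dict.mk g) cache = pvGoB f rest (PySem.Dict.mk g) cache' := by
  intro i
  induction i with
  | zero =>
    intro _ n cache hn hInv hSub
    obtain ⟨v, hv⟩ := pvOk_zero_get hn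
    have hc : (PySem.Dict.get? cache n).isSome := by rw [hSub n v hv]; rfl
    refine ⟨1, cache, le_rfl, by simp [pvS], fun _ _ h => h, hInv, hc, ?_⟩
    intro rest f
    simp only [pvGoB, hc, if_true]
  | succ i ih =>
    intro hle n cache hn hInv hSub
    have hSmono : pvS g i ≤ pvS g (i + 1) :=
      Nat.pow_le_pow_right (by omega) (by omega)
    have hSpos : 1 ≤ pvS g i := Nat.pow_pos (by omega)
    rcases pvOk_succ_elim hn with hn' | ⟨_, cs, hcs, hch⟩
    · obtain ⟨k, c', h1, h2, h3, h4, h5, h6⟩ := ih (by omega) n cache hn' hInv hSub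
      exact ⟨k, c', h1, le_trans h2 hSmono, h3, h4, h5, h6⟩
    · have hcsL : cs.length ≤ pvL g := pvCsLen hcs
      cases hc : PySem.Dict.get? cache n with
      | some v =>
        refine ⟨1, cache, le_rfl, le_trans hSpos hSmono, fun _ _ h => h, hInv, by rw [hc]; rfl, ?_⟩
        intro rest f
        simp only [pvGoB, show (PySem.Dict.get? cache n).isSome = true by rw [hc]; rfl, if_true]
      | none =>
        have hm0 : PySem.Dict.get? (PySem.Dict.mk memo) n = none := by
          cases hm : PySem.Dict.get? (PySem.Dict.mk memo) n with
          | none => rfl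
          | some w => rw [hSub n w hm] at hc; cases hc
        -- helper: once every child is cached, one step caches n with value pvVal n
        have hfinal : ∀ (c2 : PySem.Dict String Int), pvInv g memo c2 →
            pvSub (PySem.Dict.mk memo) c2 → PySem.Dict.get? c2 n = none →
            (∀ c ∈ cs, (PySem.Dict.get? c2 c).isSome) →
            ∃ c3, pvSub c2 c3 ∧ pvInv g memo c3 ∧ (PySem.Dict.get? c3 n).isSome ∧
              ∀ rest f, pvGoB (f + 1) (n :: rest) (PySem.Dict.mk g) c2 = pvGoB f rest (PySem.Dict.mk g) c3 := by
          intro c2 hInv2 hSub2 hc2 hAll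
          have hempty : (cs.filter (fun c => !(PySem.Dict.get? c2 c).isSome)).isEmpty := by
            rw [List.isEmpty_iff, List.filter_eq_nil_iff]
            intro c hcm
            simp [hAll c hcm]
          have hmap : cs.map (fun c => (PySem.Dict.get? c2 c).getD 0) = cs.map (pvVal g memo) := by
            apply List.map_congr_left
            intro c hcm
            obtain ⟨v, hv⟩ := Option.isSome_iff_exists.mp (hAll c hcm)
            rw [hv, pvValOf (hInv2 c v hv)]
            rfl
          have hval : pvVal g memo n = (cs.length : Int) + (cs.map (pvVal g memo)).sum :=
            pvVal_eq g memo (show i ≤ g.length + 1 by omega) hm0 hcs hch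
          -- n's own value, needed for the invariant of the extended cache
          obtain ⟨dn, hAn, _, _⟩ := pvLa g memo (i + 1) hle n (PySem.Dict.mk memo) (pvFA g) hn
            (pvInv_mk g memo) (fun _ _ h => h)
            (by have : (pvL g + 1) * (i + 1) ≤ (pvL g + 1) * (g.length + 2) :=
                  Nat.mul_le_mul le_rfl (by omega)
                unfold pvFA; omega)
          refine ⟨c2.insert n (pvVal g memo n), ?_, ?_, ?_, ?_⟩
          · intro k v hk
            have hkn : k ≠ n := by intro h; subst h; rw [hk] at hc2; cases hc2
            rw [PySem.Dict.get?_insert, if_neg hkn]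
            exact hk
          · intro k v hk
            rw [PySem.Dict.get?_insert] at hk
            by_cases hkn : k = n
            · rw [if_pos hkn] at hk
              subst hkn
              rw [hAn]
              simp only [Option.map_some]
              rw [← (Option.some.inj hk)]
            · rw [if_neg hkn] at hk
              exact hInv2 k v hk
          · rw [PySem.Dict.get?_insert_self]; rfl
          · intro rest f
            simp only [pvGoB, show (PySem.Dict.get? c2 n).isSome = false by rw [hc2]; rfl,
              Bool.false_eq_true, if_false, hcs]
            rw [show (cs.filter (fun c => !(PySem.Dict.get? c2 c).isSome)).isEmpty = true from
              by rw [hempty]]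
            simp only [if_true]
            rw [hmap, ← hval]
        cases hunc : cs.filter (fun c => !(PySem.Dict.get? cache c).isSome) with
        | nil =>
          obtain ⟨c3, hS3, hI3, hSome3, heq3⟩ := hfinal cache hInv hSub hc
            (by intro c hcm
                have := List.filter_eq_nil_iff.mp hunc c hcm
                exact Option.isSome_iff_ne_none.mpr (by simpa using this))
          exact ⟨1, c3, le_rfl, le_trans hSpos hSmono, hS3, hI3, hSome3, heq3⟩
        | cons u us =>
          -- push n back under its uncached children, process them, then cache n
          have hsubcs : ∀ c ∈ u :: us, c ∈ pvOk g memo i := by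
            intro c hcm
            rw [← hunc] at hcm
            exact hch c (List.mem_of_mem_filter hcm)
          obtain ⟨k2, c2, hk2, hSub2, hInv2, hSome2, heq2⟩ :=
            pvLbs g memo i (ih (by omega)) (u :: us) cache hsubcs hInv hSub
          have hlenf : (u :: us).length ≤ cs.length := by
            rw [← hunc]; exact List.length_filter_le _ _
          have hkbound : 1 + k2 + 1 ≤ pvS g (i + 1) := by
            have h1 : k2 ≤ cs.length * pvS g i := le_trans hk2 (Nat.mul_le_mul hlenf le_rfl)
            have h2 : cs.length * pvS g i ≤ pvL g * pvS g i := Nat.mul_le_mul hcsL le_rfl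
            have h3 : pvS g (i + 1) = (pvL g + 2) * pvS g i := by
              unfold pvS; ring
            have h4 : (pvL g + 2) * pvS g i = pvL g * pvS g i + 2 * pvS g i := by ring
            omega
          -- after the children: n may or may not already be cached
          cases hc2n : PySem.Dict.get? c2 n with
          | some v =>
            refine ⟨1 + k2 + 1, c2, by omega, hkbound, hSub2, hInv2, by rw [hc2n]; rfl, ?_⟩
            intro rest f
            have hstep1 : ∀ f', pvGoB (f' + 1) (n :: rest) (PySem.Dict.mk g) cache =
                pvGoB f' ((u :: us) ++ n :: rest) (PySem.Dict.mk g) cache := by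
              intro f'
              simp only [pvGoB, show (PySem.Dict.get? cache n).isSome = false by rw [hc]; rfl,
                Bool.false_eq_true, if_false, hcs]
              rw [hunc]
              simp
            have : f + (1 + k2 + 1) = ((f + 1) + k2) + 1 := by omega
            rw [this, hstep1, heq2 (n :: rest) (f + 1)]
            simp only [pvGoB, show (PySem.Dict.get? c2 n).isSome = true by rw [hc2n]; rfl, if_true]
          | none =>
            obtain ⟨c3, hS3, hI3, hSome3, heq3⟩ := hfinal c2 hInv2 (pvSub_trans hSub hSub2) hc2n
              (by intro c hcm
                  by_cases hcu : c ∈ u :: us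
                  · exact hSome2 c hcu
                  · have : ¬ (!(PySem.Dict.get? cache c).isSome) = true := by
                      intro hnot
                      exact hcu (by rw [← hunc]; exact List.mem_filter.mpr ⟨hcm, hnot⟩)
                    simp only [Bool.not_eq_true', Bool.not_eq_false] at this
                    obtain ⟨v, hv⟩ := Option.isSome_iff_exists.mp this
                    rw [hSub2 c v hv]; rfl)
            refine ⟨1 + k2 + 1, c3, by omega, hkbound, pvSub_trans hSub2 hS3, hI3, hSome3, ?_⟩
            intro rest f
            have hstep1 : ∀ f', pvGoB (f' + 1) (n :: rest) (PySem.Dict.mk g) cache =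
                pvGoB f' ((u :: us) ++ n :: rest) (PySem.Dict.mk g) cache := by
              intro f'
              simp only [pvGoB, show (PySem.Dict.get? cache n).isSome = false by rw [hc]; rfl,
                Bool.false_eq_true, if_false, hcs]
              rw [hunc]
              simp
            have : f + (1 + k2 + 1) = ((f + 1) + k2) + 1 := by omega
            rw [this, hstep1, heq2 (n :: rest) (f + 1), heq3 rest f]

-- ===== VERDICT (by name: the statement is the Claim_ definition above) =====
theorem getTotalOrbitsHelper_spec : Claim_equal_getTotalOrbitsHelper := by
  intro orbiter g memo _ hPre
  unfold Spec_getTotalOrbitsHelper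
  obtain ⟨k, cache', hk1, hkS, _, hInv', hSome', heq⟩ :=
    pvLb g memo (g.length + 1) le_rfl orbiter (PySem.Dict.mk memo) hPre
      (pvInv_mk g memo) (fun _ _ h => h)
  obtain ⟨v, hv⟩ := Option.isSome_iff_exists.mp hSome'
  have hval : getTotalOrbitsHelper orbiter g memo = v := pvValOf (hInv' orbiter v hv)
  have hfb : pvFB g = (pvFB g - k) + k := by unfold pvFB at *; omega
  have halt : getTotalOrbitsHelper_alt orbiter g memo = v := by
    unfold getTotalOrbitsHelper_alt
    rw [hfb, heq [] (pvFB g - k), pvGoB_nil (by unfold pvFB at *; omega)]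
    show (PySem.Dict.get? cache' orbiter).getD 0 = v
    rw [hv]
    rfl
  rw [hval, halt]
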